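-- pv_equiv track=rewrite | github.com/ggongjukim/Algorithm | 프로그래머스/lv3/12987. 숫자 게임/숫자 게임.py | solution
-- ===== SOURCE A (Python) =====
-- import heapq
--
-- def solution(A, B):
--     answer = 0
--     A = [-1*i for i in A]
--     B = [-1*i for i in B]
--     heapq.heapify(A)
--     heapq.heapify(B)
--     while A and B:
--         bigA = heapq.heappop(A)
--         bigB = heapq.heappop(B)
--         if -1*bigA < -1*bigB:
--             answer +=1
--         else:
--             heapq.heappush(B,bigB)
--     return answer
-- ===== SOURCE B (Python) =====
-- def solution(A, B):
--     # Two-pointer sweep over descending sorted copies instead of repeated heap pops.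
--     sa = sorted(A, reverse=True)
--     sb = sorted(B, reverse=True)
--     answer = 0
--     i = j = 0
--     while i < len(sa) and j < len(sb):
--         if sb[j] > sa[i]:
--             answer += 1
--             j += 1
--         i += 1
--     return answer
-- ===== Notes on version B (the rewrite author's own statement) =====
-- stated objective: faster
-- what changed: Replaces the negated max-heaps with repeated heappop/heappush by one descending sort of each list and a single two-pointer sweep that advances both pointers on a win and only A's pointer otherwise.
import Mathlib
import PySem

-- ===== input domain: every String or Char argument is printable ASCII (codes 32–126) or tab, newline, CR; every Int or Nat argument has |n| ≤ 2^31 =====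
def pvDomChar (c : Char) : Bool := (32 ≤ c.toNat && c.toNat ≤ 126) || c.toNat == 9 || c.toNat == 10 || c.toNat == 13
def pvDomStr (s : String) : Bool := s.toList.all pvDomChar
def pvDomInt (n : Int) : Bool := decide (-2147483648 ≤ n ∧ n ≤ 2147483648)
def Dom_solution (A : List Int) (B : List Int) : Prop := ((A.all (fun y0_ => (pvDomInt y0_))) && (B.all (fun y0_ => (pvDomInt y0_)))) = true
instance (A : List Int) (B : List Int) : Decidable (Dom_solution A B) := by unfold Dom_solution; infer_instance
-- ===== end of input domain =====

-- B replaces A's negated min-heaps (repeated heappop/heappush) by one descending sort of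
-- each list and a single two-pointer sweep; equal return value proved (A does not mutate
-- its caller-visible arguments: it rebinds A and B to fresh negated lists).


-- ===== PORT A =====
-- heapq is modeled by its contract: a heap is the list of its elements, heappop extracts a
-- minimal element (for Int values equal elements are indistinguishable, so WHICH minimal
-- position pops is irrelevant to the value), heappush(B, bigB) after popping bigB restores B.
-- termination helper for the loop: the popped minimum is a member, so erase shrinks the list
theorem pvFoldlMinMem (l : List Int) (a : Int) : l.foldl min a ∈ a :: l := by
  induction l generalizing a with
  | nil => simp
  | cons x xs ih =>
    simp only [List.foldl_cons]
    rcases List.mem_cons.1 (ih (min a x)) with h | h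
    · rcases min_choice a x with hm | hm <;> rw [h, hm] <;> simp
    · simp [h]

def solutionLoop : List Int → List Int → Int → Int
  | [], _, answer => answer
  | _ :: _, [], answer => answer
  | x :: xs, y :: ys, answer =>
    let bigA := xs.foldl min x            -- heapq.heappop(A)
    let A' := (x :: xs).erase bigA
    let bigB := ys.foldl min y            -- heapq.heappop(B)
    if -1 * bigA < -1 * bigB then
      solutionLoop A' ((y :: ys).erase bigB) (answer + 1)
    else
      solutionLoop A' (y :: ys) answer    -- heapq.heappush(B, bigB): B unchanged
  termination_by xs _ _ => xs.length
  decreasing_by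
    all_goals
      simp only [List.foldl_attach]
      rw [List.length_erase_of_mem (pvFoldlMinMem xs x), List.length_cons]; omega

def solution (A : List Int) (B : List Int) : Int :=
  solutionLoop (A.map (fun i => -1 * i)) (B.map (fun i => -1 * i)) 0

-- ===== PORT B =====
-- the while loop over indices i, j becomes structural recursion over the two suffixes
def solutionAltLoop : List Int → List Int → Int → Int
  | a :: sa, b :: sb, answer =>
    if b > a then solutionAltLoop sa sb (answer + 1)
    else solutionAltLoop sa (b :: sb) answer
  | _, _, answer => answer

def solution_alt (A : List Int) (B : List Int) : Int :=
  solutionAltLoop (PySem.List.sorted A (fun x => x) true) (PySem.List.sorted B (fun x => x) true) 0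

-- ===== PRECONDITION & SPEC =====
def Spec_solution (A : List Int) (B : List Int) (out : Int) : Prop := out = solution_alt A B
instance (A : List Int) (B : List Int) (out : Int) : Decidable (Spec_solution A B out) := by unfold Spec_solution; infer_instance

-- ===== CLAIM (what is proved, stated in full; the proofs are below) =====
def Claim_equal_solution : Prop := ∀ (A : List Int) (B : List Int), Dom_solution A B → Spec_solution A B (solution A B)

-- ===== LEMMAS AND PROOFS =====

theorem pvFoldlMinLe (l : List Int) (a : Int) : ∀ x ∈ a :: l, l.foldl min a ≤ x := by
  induction l generalizing a with
  | nil => simp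
  | cons y ys ih =>
    intro x hx
    simp only [List.foldl_cons]
    rcases List.mem_cons.1 hx with rfl | hx
    · exact le_trans (ih (min x y) _ (List.mem_cons_self ..)) (min_le_left x y)
    · rcases List.mem_cons.1 hx with rfl | hx
      · exact le_trans (ih (min a x) _ (List.mem_cons_self ..)) (min_le_right a x)
      · exact ih (min a y) x (List.mem_cons_of_mem _ hx)

-- the popped minimum is determined by the multiset of the heap
theorem pvFoldlMinPerm {a a' : Int} {l l' : List Int} (h : (a :: l).Perm (a' :: l')) :
    l.foldl min a = l'.foldl min a' := by
  apply le_antisymm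
  · exact pvFoldlMinLe l a _ (h.mem_iff.2 (pvFoldlMinMem l' a'))
  · exact pvFoldlMinLe l' a' _ (h.mem_iff.1 (pvFoldlMinMem l a))

-- the loop's value depends only on the multisets of the two heaps
theorem pvLoopPermAux (n : Nat) : ∀ (xs ys : List Int) (answer : Int) (xs' ys' : List Int),
    xs.length = n → xs.Perm xs' → ys.Perm ys' →
      solutionLoop xs ys answer = solutionLoop xs' ys' answer := by
  induction n using Nat.strong_induction_on with
  | _ n ih =>
    intro xs ys answer xs' ys' hn hx hy
    cases xs with
    | nil =>
      rw [List.perm_nil.1 hx.symm]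
      simp [solutionLoop]
    | cons x t =>
      cases xs' with
      | nil => exact absurd (List.perm_nil.1 hx) (by simp)
      | cons x' t' =>
        cases ys with
        | nil =>
          rw [List.perm_nil.1 hy.symm]
          simp [solutionLoop]
        | cons y u =>
          cases ys' with
          | nil => exact absurd (List.perm_nil.1 hy) (by simp)
          | cons y' u' =>
            rw [solutionLoop, solutionLoop]
            have hA : t.foldl min x = t'.foldl min x' := pvFoldlMinPerm hx
            have hB : u.foldl min y = u'.foldl min y' := pvFoldlMinPerm hy
            rw [← hA, ← hB]
            have hlen : ((x :: t).erase (t.foldl min x)).length = n - 1 := by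
              rw [List.length_erase_of_mem (pvFoldlMinMem t x)]
              simp at hn ⊢; omega
            have hnpos : 0 < n := by simp at hn; omega
            by_cases hlt : -1 * t.foldl min x < -1 * u.foldl min y
            · rw [if_pos hlt, if_pos hlt]
              exact ih (n - 1) (by omega) _ _ _ _ _ hlen (hx.erase _) (hy.erase _)
            · rw [if_neg hlt, if_neg hlt]
              exact ih (n - 1) (by omega) _ _ _ _ _ hlen (hx.erase _) hy

theorem pvLoopPerm (xs ys : List Int) (answer : Int) (xs' ys' : List Int)
    (hx : xs.Perm xs') (hy : ys.Perm ys') :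
    solutionLoop xs ys answer = solutionLoop xs' ys' answer :=
  pvLoopPermAux xs.length xs ys answer xs' ys' rfl hx hy

theorem pvFoldlMinOfLe (l : List Int) (a : Int) (h : ∀ x ∈ l, a ≤ x) : l.foldl min a = a := by
  induction l generalizing a with
  | nil => rfl
  | cons y ys ih =>
    simp only [List.foldl_cons, min_eq_left (h y (List.mem_cons_self ..))]
    exact ih a (fun x hx => h x (List.mem_cons_of_mem _ hx))

-- on heaps that are the negations of descending-sorted lists, A's loop is B's sweep
theorem pvLoopSorted (sa : List Int) :
    ∀ sb answer, sa.Pairwise (fun p q => q ≤ p) → sb.Pairwise (fun p q => q ≤ p) →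
      solutionLoop (sa.map (fun i => -1 * i)) (sb.map (fun i => -1 * i)) answer =
        solutionAltLoop sa sb answer := by
  induction sa with
  | nil => intro sb answer _ _; cases sb <;> simp [solutionLoop, solutionAltLoop]
  | cons a as ih =>
    intro sb answer ha hb
    cases sb with
    | nil => simp [solutionLoop, solutionAltLoop]
    | cons b bs =>
      have hma : (as.map (fun i => -1 * i)).foldl min (-1 * a) = -1 * a := by
        apply pvFoldlMinOfLe
        intro x hx
        rcases List.mem_map.1 hx with ⟨z, hz, rfl⟩
        have := (List.pairwise_cons.1 ha).1 z hz
        omega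
      have hmb : (bs.map (fun i => -1 * i)).foldl min (-1 * b) = -1 * b := by
        apply pvFoldlMinOfLe
        intro x hx
        rcases List.mem_map.1 hx with ⟨z, hz, rfl⟩
        have := (List.pairwise_cons.1 hb).1 z hz
        omega
      rw [List.map_cons, List.map_cons, solutionLoop]
      simp only [hma, hmb, List.erase_cons_head]
      by_cases hlt : -1 * (-1 * a) < -1 * (-1 * b)
      · rw [if_pos hlt, solutionAltLoop, if_pos (by omega : b > a)]
        exact ih bs (answer + 1) ha.tail hb.tail
      · rw [if_neg hlt, solutionAltLoop, if_neg (by omega : ¬ b > a), ← List.map_cons]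
        exact ih (b :: bs) answer ha.tail hb

-- ===== VERDICT (by name: the statement is the Claim_ definition above) =====
theorem solution_spec : Claim_equal_solution := by
  intro A B _
  unfold Spec_solution solution solution_alt
  rw [pvLoopPerm (A.map (fun i => -1 * i)) (B.map (fun i => -1 * i)) 0
        ((PySem.List.sorted A (fun x => x) true).map (fun i => -1 * i))
        ((PySem.List.sorted B (fun x => x) true).map (fun i => -1 * i))
        ((PySem.List.sorted_perm A (fun x => x) true).symm.map _)
        ((PySem.List.sorted_perm B (fun x => x) true).symm.map _)]
  exact pvLoopSorted _ _ 0
    (by simpa using PySem.List.sorted_pairwise_rev A (fun x => x))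
    (by simpa using PySem.List.sorted_pairwise_rev B (fun x => x))
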